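-- pv_equiv track=rewrite | github.com/AmitElia/Bioinf_tools | courses/BENG182/A2/locAL.py | get_mid_col
-- ===== SOURCE A (Python) =====
-- import copy
--
-- def get_mid_col(seq1, seq2, m, s, d):
--     prev = []
--     bt = []
--     S = []
--     for j in range(len(seq2) + 1):
--         S = []
--         bt = []
--         for i in range(len(seq1) + 1):
--             if j == 0:
--                 #S.insert(i, d*i)
--                 S.insert(i, 0)
--                 bt.insert(i, "S")
--             elif i == 0:
--                 #S.insert(i,d *j)
--                 S.insert(i, 0)
--                 bt.insert(i, "E")
--             else:
--                 match = s
--                 if seq1[i - 1] == seq2[j - 1]: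
--                     match = m
--                 decision = max(prev[i-1] + match, S[i-1] + d, prev[i] + d)
--                 S.insert(i, decision)
--                 if decision == prev[i-1] + match:
--                     bt.insert(i, "D")
--                 elif decision == prev[i] + d:
--                     bt.insert(i, "E")
--                 elif decision == S[i-1] + d:
--                     bt.insert(i, "S")
--         prev = copy.deepcopy(S)
--     return S, bt
-- ===== SOURCE B (Python) =====
-- def get_mid_col(seq1, seq2, m, s, d):
--     n1, n2 = len(seq1), len(seq2)
--     memo = {}
--
--     def score(i, j):
--         # demand-driven top-down evaluation of the alignment score with an explicit work stack
--         stack = [(i, j)]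
--         while stack:
--             a, b = stack.pop()
--             if (a, b) in memo:
--                 continue
--             if a == 0 or b == 0:
--                 memo[(a, b)] = 0
--                 continue
--             missing = [p for p in ((a - 1, b - 1), (a - 1, b), (a, b - 1)) if p not in memo]
--             if missing:
--                 stack.append((a, b))
--                 stack.extend(missing)
--             else:
--                 mt = m if seq1[a - 1] == seq2[b - 1] else s
--                 memo[(a, b)] = max(memo[(a - 1, b - 1)] + mt,
--                                    memo[(a - 1, b)] + d,
--                                    memo[(a, b - 1)] + d)
--         return memo[(i, j)]
--
--     S_out, bt_out = [], []
--     for i in range(n1 + 1):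
--         v = score(i, n2)
--         if n2 == 0:
--             arrow = "S"
--         elif i == 0:
--             arrow = "E"
--         else:
--             mt = m if seq1[i - 1] == seq2[n2 - 1] else s
--             if v == score(i - 1, n2 - 1) + mt:
--                 arrow = "D"
--             elif v == score(i, n2 - 1) + d:
--                 arrow = "E"
--             else:
--                 arrow = "S"
--         S_out.append(v)
--         bt_out.append(arrow)
--     return S_out, bt_out
-- ===== Notes on version B (the rewrite author's own statement) =====
-- stated objective: alternative
-- what changed: A fills the DP table bottom-up column-by-column over seq2, deep-copying each finished column into prev and returning the last column it happens to build; B evaluates cells top-down on demand: a memo dict plus an explicit work stack resolves each requested cell from its three dependencies, and the main loop just asks for the final-column cell of every row and its two backtrace neighbours.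
import Mathlib
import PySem

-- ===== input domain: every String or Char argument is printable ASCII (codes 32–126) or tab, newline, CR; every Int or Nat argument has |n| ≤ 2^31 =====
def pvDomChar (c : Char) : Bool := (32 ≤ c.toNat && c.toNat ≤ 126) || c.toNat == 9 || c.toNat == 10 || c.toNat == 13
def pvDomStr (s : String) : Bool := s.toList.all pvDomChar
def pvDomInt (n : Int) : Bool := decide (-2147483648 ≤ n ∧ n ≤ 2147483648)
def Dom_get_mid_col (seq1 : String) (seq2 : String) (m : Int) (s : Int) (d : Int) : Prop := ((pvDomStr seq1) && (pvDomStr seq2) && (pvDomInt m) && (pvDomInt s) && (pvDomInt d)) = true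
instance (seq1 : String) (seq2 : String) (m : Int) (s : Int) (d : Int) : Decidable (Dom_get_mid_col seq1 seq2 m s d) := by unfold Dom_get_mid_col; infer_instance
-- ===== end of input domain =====

-- A builds the DP bottom-up column-by-column (deep-copying each column); B evaluates cells
-- top-down on demand with a memo dict and an explicit work stack (objective: alternative).

-- ===== PORT A =====
-- A's inner loop body (one cell of column j; Python's list.insert at index == current length, i.e. append).
-- All list indexings in A are always in range, so `getD _ 0` is exact there.
def pvAInner (a b : List Char) (m s d : Int) (prevL : List Int) (j : Nat)
    (sb : List Int × List String) (i : Nat) : List Int × List String :=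
  let S := sb.1
  let bt := sb.2
  if j = 0 then (S ++ [0], bt ++ ["S"])
  else if i = 0 then (S ++ [0], bt ++ ["E"])
  else
    let mtch := if a.getD (i - 1) ' ' = b.getD (j - 1) ' ' then m else s
    let decision := max (max (prevL.getD (i - 1) 0 + mtch) (S.getD (i - 1) 0 + d)) (prevL.getD i 0 + d)
    let S' := S ++ [decision]
    let bt' :=
      if decision = prevL.getD (i - 1) 0 + mtch then bt ++ ["D"]
      else if decision = prevL.getD i 0 + d then bt ++ ["E"]
      else if decision = S.getD (i - 1) 0 + d then bt ++ ["S"]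
      else bt
    (S', bt')

-- A's outer loop body: rebuild S and bt for column j, then prev = deepcopy(S).
def pvAOuter (a b : List Char) (m s d : Int)
    (st : List Int × List Int × List String) (j : Nat) : List Int × List Int × List String :=
  let inner := (List.range (a.length + 1)).foldl (pvAInner a b m s d st.1 j) ([], [])
  (inner.1, inner.1, inner.2)

def get_mid_col (seq1 : String) (seq2 : String) (m : Int) (s : Int) (d : Int) : List Int × List String :=
  let a := seq1.toList
  let b := seq2.toList
  let fin := (List.range (b.length + 1)).foldl (pvAOuter a b m s d) ([], [], [])
  (fin.2.1, fin.2.2)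

-- ===== PORT B =====
-- B's `while stack:` loop of `score`, made total with a fuel counter (fuel only guards
-- termination; the proofs show the chosen fuel is always enough for the loop to drain the stack).
-- The Python stack's top is the list's end; here the stack is a list whose HEAD is the top.
-- Python's memo[...] reads in the compute branch can never raise (missing == []), so `getD _ 0` is exact.
def pvBLoop (c1 c2 : List Char) (m s d : Int) :
    Nat → List (Nat × Nat) → PySem.Dict (Nat × Nat) Int → PySem.Dict (Nat × Nat) Int
  | 0, _, memo => memo
  | _ + 1, [], memo => memo
  | fuel + 1, (x, y) :: st, memo =>
    if (memo.get? (x, y)).isSome then pvBLoop c1 c2 m s d fuel st memo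
    else if x = 0 ∨ y = 0 then pvBLoop c1 c2 m s d fuel st (memo.insert (x, y) 0)
    else
      let missing := ([((x - 1 : Nat), (y - 1 : Nat)), (x - 1, y), (x, y - 1)]).filter
        (fun p => (memo.get? p).isNone)
      -- Python: `if missing: push else: compute` — same two branches
      if missing = [] then
        let mt := if c1.getD (x - 1) ' ' = c2.getD (y - 1) ' ' then m else s
        let v := max (max (memo.getD (x - 1, y - 1) 0 + mt) (memo.getD (x - 1, y) 0 + d))
                     (memo.getD (x, y - 1) 0 + d)
        pvBLoop c1 c2 m s d fuel st (memo.insert (x, y) v)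
      else pvBLoop c1 c2 m s d fuel (missing.reverse ++ (x, y) :: st) memo

-- B's `score(i, j)`: run the stack loop, then read memo[(i, j)] (always present; `getD _ 0` exact).
def pvBScore (c1 c2 : List Char) (m s d : Int) (i j : Nat)
    (memo : PySem.Dict (Nat × Nat) Int) : Int × PySem.Dict (Nat × Nat) Int :=
  let memo' := pvBLoop c1 c2 m s d (4 ^ (i + j + 1)) [(i, j)] memo
  (memo'.getD (i, j) 0, memo')

-- B's main loop body: one row i — ask for the final-column cell and, for the arrow,
-- its two backtrace neighbours (short-circuit order as in Python's if/elif).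
def pvBStep (c1 c2 : List Char) (m s d : Int)
    (st : PySem.Dict (Nat × Nat) Int × List Int × List String) (i : Nat) :
    PySem.Dict (Nat × Nat) Int × List Int × List String :=
  let r := pvBScore c1 c2 m s d i c2.length st.1
  if c2.length = 0 then (r.2, st.2.1 ++ [r.1], st.2.2 ++ ["S"])
  else if i = 0 then (r.2, st.2.1 ++ [r.1], st.2.2 ++ ["E"])
  else
    let mt := if c1.getD (i - 1) ' ' = c2.getD (c2.length - 1) ' ' then m else s
    let rd := pvBScore c1 c2 m s d (i - 1) (c2.length - 1) r.2
    if r.1 = rd.1 + mt then (rd.2, st.2.1 ++ [r.1], st.2.2 ++ ["D"])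
    else
      let re := pvBScore c1 c2 m s d i (c2.length - 1) rd.2
      if r.1 = re.1 + d then (re.2, st.2.1 ++ [r.1], st.2.2 ++ ["E"])
      else (re.2, st.2.1 ++ [r.1], st.2.2 ++ ["S"])

def get_mid_col_alt (seq1 : String) (seq2 : String) (m : Int) (s : Int) (d : Int) : List Int × List String :=
  let a := seq1.toList
  let b := seq2.toList
  let fin := (List.range (a.length + 1)).foldl (pvBStep a b m s d) (PySem.Dict.empty, [], [])
  (fin.2.1, fin.2.2)

-- ===== PRECONDITION & SPEC =====
def Spec_get_mid_col (seq1 : String) (seq2 : String) (m : Int) (s : Int) (d : Int) (out : List Int × List String) : Prop := out = get_mid_col_alt seq1 seq2 m s d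
instance (seq1 : String) (seq2 : String) (m : Int) (s : Int) (d : Int) (out : List Int × List String) : Decidable (Spec_get_mid_col seq1 seq2 m s d out) := by unfold Spec_get_mid_col; infer_instance

-- ===== CLAIM (what is proved, stated in full; the proofs are below) =====
def Claim_equal_get_mid_col : Prop := ∀ (seq1 : String) (seq2 : String) (m : Int) (s : Int) (d : Int), Dom_get_mid_col seq1 seq2 m s d → Spec_get_mid_col seq1 seq2 m s d (get_mid_col seq1 seq2 m s d)

-- ===== LEMMAS AND PROOFS =====

-- the match/mismatch score of cell (i, j), 1-based in both sequences
def pvMt (a b : List Char) (m s : Int) (i j : Nat) : Int :=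
  if a.getD (i - 1) ' ' = b.getD (j - 1) ' ' then m else s

-- the DP table both programs compute (0 boundaries, identical recurrence)
def pvT (a b : List Char) (m s d : Int) : Nat → Nat → Int
  | _, 0 => 0
  | 0, _ + 1 => 0
  | i + 1, j + 1 =>
      max (max (pvT a b m s d i j + pvMt a b m s (i + 1) (j + 1))
               (pvT a b m s d i (j + 1) + d))
          (pvT a b m s d (i + 1) j + d)

-- the arrow both programs attach to cell (i, j)
def pvArrow (a b : List Char) (m s d : Int) (i j : Nat) : String :=
  if j = 0 then "S"
  else if i = 0 then "E"
  else if pvT a b m s d i j = pvT a b m s d (i - 1) (j - 1) + pvMt a b m s i j then "D"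
  else if pvT a b m s d i j = pvT a b m s d i (j - 1) + d then "E"
  else "S"

lemma pv_getD_map_range (f : Nat → Int) {n i : Nat} (h : i < n) :
    ((List.range n).map f).getD i 0 = f i := by
  rw [List.getD_eq_getElem?_getD]
  simp [h]

lemma pv_max3_third (x y z : Int) (h1 : max (max x y) z ≠ x) (h2 : max (max x y) z ≠ z) :
    max (max x y) z = y := by
  rcases max_choice (max x y) z with h | h
  · rcases max_choice x y with h' | h' <;> omega
  · omega

lemma pvArrow_succ (a b : List Char) (m s d : Int) (i j : Nat) :
    pvArrow a b m s d (i + 1) (j + 1) =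
      if pvT a b m s d (i + 1) (j + 1) = pvT a b m s d i j + pvMt a b m s (i + 1) (j + 1) then "D"
      else if pvT a b m s d (i + 1) (j + 1) = pvT a b m s d (i + 1) j + d then "E"
      else "S" := by
  simp [pvArrow]

-- A's inner loop builds column j of the table with its arrows
lemma pvA_inner_char (a b : List Char) (m s d : Int) (j : Nat) (prevL : List Int)
    (hprev : j ≠ 0 → ∀ i, i ≤ a.length → prevL.getD i 0 = pvT a b m s d i (j - 1)) :
    ∀ k, k ≤ a.length + 1 →
      (List.range k).foldl (pvAInner a b m s d prevL j) ([], []) =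
        ((List.range k).map (fun i => pvT a b m s d i j),
         (List.range k).map (fun i => pvArrow a b m s d i j)) := by
  intro k
  induction k with
  | zero => intro _; simp
  | succ k ih =>
    intro hk
    have hk' : k ≤ a.length + 1 := Nat.le_of_succ_le hk
    rw [List.range_succ, List.foldl_append, ih hk']
    simp only [List.foldl_cons, List.foldl_nil, List.map_append, List.map_cons, List.map_nil]
    rcases Nat.eq_zero_or_pos j with hj | hj
    · subst hj
      cases k with
      | zero => simp [pvAInner, pvT, pvArrow]
      | succ k' => simp [pvAInner, pvT, pvArrow]
    · obtain ⟨j', rfl⟩ : ∃ j', j = j' + 1 := ⟨j - 1, by omega⟩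
      cases k with
      | zero => simp [pvAInner, pvT, pvArrow]
      | succ k' =>
        have hk1 : k' + 1 ≤ a.length := by omega
        have hP1 : prevL.getD k' 0 = pvT a b m s d k' j' := by
          have := hprev (by omega) k' (by omega); simpa using this
        have hP2 : prevL.getD (k' + 1) 0 = pvT a b m s d (k' + 1) j' := by
          have := hprev (by omega) (k' + 1) hk1; simpa using this
        have hS : ((List.range (k' + 1)).map (fun i => pvT a b m s d i (j' + 1))).getD k' 0 =
            pvT a b m s d k' (j' + 1) := pv_getD_map_range _ (by omega)
        simp only [pvAInner]
        simp only [Nat.succ_ne_zero, if_false, Nat.add_sub_cancel, hP1, hP2, hS]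
        have hdec : max (max (pvT a b m s d k' j' + (if a.getD k' ' ' = b.getD j' ' ' then m else s))
              (pvT a b m s d k' (j' + 1) + d)) (pvT a b m s d (k' + 1) j' + d) =
            pvT a b m s d (k' + 1) (j' + 1) := by
          rw [pvT]; rfl
        rw [hdec]
        have hmt : pvMt a b m s (k' + 1) (j' + 1) = (if a.getD k' ' ' = b.getD j' ' ' then m else s) := by
          simp [pvMt]
        rw [Prod.mk.injEq]
        refine ⟨rfl, ?_⟩
        -- arrows: case on the D / E / S priority
        rw [← hmt, pvArrow_succ]
        have hdec' : max (max (pvT a b m s d k' j' + pvMt a b m s (k' + 1) (j' + 1))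
              (pvT a b m s d k' (j' + 1) + d)) (pvT a b m s d (k' + 1) j' + d) =
            pvT a b m s d (k' + 1) (j' + 1) := by rw [hmt]; exact hdec
        by_cases h1 : pvT a b m s d (k' + 1) (j' + 1) =
            pvT a b m s d k' j' + pvMt a b m s (k' + 1) (j' + 1)
        · simp only [if_pos h1]
        · simp only [if_neg h1]
          by_cases h2 : pvT a b m s d (k' + 1) (j' + 1) = pvT a b m s d (k' + 1) j' + d
          · simp only [if_pos h2]
          · simp only [if_neg h2]
            have h3 := pv_max3_third
              (pvT a b m s d k' j' + pvMt a b m s (k' + 1) (j' + 1))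
              (pvT a b m s d k' (j' + 1) + d)
              (pvT a b m s d (k' + 1) j' + d)
              (by rw [hdec']; exact h1) (by rw [hdec']; exact h2)
            rw [hdec'] at h3
            rw [if_pos h3]

-- the prev column / output columns of A's outer loop after k iterations
def pvACols (a b : List Char) (m s d : Int) (k : Nat) : List Int :=
  if k = 0 then [] else (List.range (a.length + 1)).map (fun i => pvT a b m s d i (k - 1))
def pvABts (a b : List Char) (m s d : Int) (k : Nat) : List String :=
  if k = 0 then [] else (List.range (a.length + 1)).map (fun i => pvArrow a b m s d i (k - 1))

lemma pvA_outer_char (a b : List Char) (m s d : Int) :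
    ∀ k, k ≤ b.length + 1 →
      (List.range k).foldl (pvAOuter a b m s d) ([], [], []) =
        (pvACols a b m s d k, pvACols a b m s d k, pvABts a b m s d k) := by
  intro k
  induction k with
  | zero => intro _; simp [pvACols, pvABts]
  | succ k ih =>
    intro hk
    rw [List.range_succ, List.foldl_append, ih (by omega)]
    simp only [List.foldl_cons, List.foldl_nil]
    have hinner :
        (List.range (a.length + 1)).foldl (pvAInner a b m s d (pvACols a b m s d k) k) ([], []) =
          ((List.range (a.length + 1)).map (fun i => pvT a b m s d i k),
           (List.range (a.length + 1)).map (fun i => pvArrow a b m s d i k)) := by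
      apply pvA_inner_char
      · intro hk0 i hi
        simp only [pvACols, hk0, if_false]
        exact pv_getD_map_range _ (by omega)
      · exact Nat.le_refl _
    simp only [pvAOuter, hinner]
    simp [pvACols, pvABts]

-- ---- B side: correctness of the memoized stack evaluation ----

-- every memo entry is the DP value of its cell
def pvValid (a b : List Char) (m s d : Int) (mm : PySem.Dict (Nat × Nat) Int) : Prop :=
  ∀ x y v, mm.get? (x, y) = some v → v = pvT a b m s d x y

-- old memo entries survive
def pvMono (m1 m2 : PySem.Dict (Nat × Nat) Int) : Prop :=
  ∀ k v, m1.get? k = some v → m2.get? k = some v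

lemma pvBLoop_nil (c1 c2 : List Char) (m s d : Int) (f : Nat) (mm : PySem.Dict (Nat × Nat) Int) :
    pvBLoop c1 c2 m s d f [] mm = mm := by
  cases f <;> simp [pvBLoop]

-- processing one stack cell: with fuel ≥ 4^(n+1) the loop memoizes the cell and moves on
lemma pvBLoop_cell (a b : List Char) (m s d : Int) :
    ∀ n : Nat, ∀ x y : Nat, x + y ≤ n →
      ∀ (st : List (Nat × Nat)) (mm : PySem.Dict (Nat × Nat) Int) (fuel : Nat),
        pvValid a b m s d mm → 4 ^ (n + 1) ≤ fuel →
        ∃ fuel' mm', pvBLoop a b m s d fuel ((x, y) :: st) mm = pvBLoop a b m s d fuel' st mm' ∧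
          fuel - 4 ^ (n + 1) ≤ fuel' ∧ pvValid a b m s d mm' ∧ pvMono mm mm' ∧
          mm'.get? (x, y) = some (pvT a b m s d x y) := by
  intro n
  induction n using Nat.strong_induction_on with
  | _ n IH =>
    intro x y hxy st mm fuel hval hfuel
    have h41 : 1 ≤ 4 ^ n := Nat.one_le_pow _ _ (by norm_num)
    have h4s : 4 ^ (n + 1) = 4 * 4 ^ n := by rw [pow_succ]; ring
    obtain ⟨f, rfl⟩ : ∃ f, fuel = f + 1 := ⟨fuel - 1, by omega⟩
    rcases hsome : mm.get? (x, y) with _ | v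
    · -- not memoized
      rcases hbd : decide (x = 0 ∨ y = 0) with _ | _
      · -- interior cell
        have hbd' : ¬ (x = 0 ∨ y = 0) := of_decide_eq_false hbd
        obtain ⟨x', rfl⟩ : ∃ x', x = x' + 1 := ⟨x - 1, by omega⟩
        obtain ⟨y', rfl⟩ : ∃ y', y = y' + 1 := ⟨y - 1, by omega⟩
        have hn2 : 2 ≤ n := by omega
        -- the three dependencies, all of strictly smaller index sum
        set deps : List (Nat × Nat) := [(x', y'), (x', y' + 1), (x' + 1, y')] with hdeps
        have hdeps_lt : ∀ p ∈ deps, p.1 + p.2 < n := by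
          intro p hp
          simp only [hdeps, List.mem_cons, List.not_mem_nil, or_false] at hp
          rcases hp with rfl | rfl | rfl <;> simp <;> omega
        set missing := deps.filter (fun p => (mm.get? p).isNone) with hmiss
        have hstep : pvBLoop a b m s d (f + 1) ((x' + 1, y' + 1) :: st) mm =
            if missing = [] then
              pvBLoop a b m s d f st (mm.insert (x' + 1, y' + 1)
                (max (max (mm.getD (x', y') 0 + pvMt a b m s (x' + 1) (y' + 1))
                          (mm.getD (x', y' + 1) 0 + d))
                     (mm.getD (x' + 1, y') 0 + d)))
            else pvBLoop a b m s d f (missing.reverse ++ (x' + 1, y' + 1) :: st) mm := by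
          simp only [pvBLoop, hsome, Option.isSome_none, Bool.false_eq_true, if_false,
            hbd', if_false, pvMt, Nat.add_sub_cancel]
          rfl
        -- helper: after deps are all memoized, one more step computes the cell
        have hfinal : ∀ (mm2 : PySem.Dict (Nat × Nat) Int) (g : Nat),
            pvValid a b m s d mm2 → pvMono mm mm2 →
            (∀ p ∈ deps, mm2.get? p = some (pvT a b m s d p.1 p.2)) →
            ∃ mm', pvBLoop a b m s d (g + 1) ((x' + 1, y' + 1) :: st) mm2 =
                pvBLoop a b m s d g st mm' ∧ pvValid a b m s d mm' ∧ pvMono mm mm' ∧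
                mm'.get? (x' + 1, y' + 1) = some (pvT a b m s d (x' + 1) (y' + 1)) := by
          intro mm2 g hval2 hmono2 hdeps2
          have hd1 := hdeps2 (x', y') (by simp [hdeps])
          have hd2 := hdeps2 (x', y' + 1) (by simp [hdeps])
          have hd3 := hdeps2 (x' + 1, y') (by simp [hdeps])
          rcases hsome2 : mm2.get? (x' + 1, y' + 1) with _ | w
          · -- still not memoized: missing is now empty, compute
            have hmiss2 : deps.filter (fun p => (mm2.get? p).isNone) = [] := by
              simp [hdeps, List.filter, hd1, hd2, hd3]
            refine ⟨mm2.insert (x' + 1, y' + 1) (pvT a b m s d (x' + 1) (y' + 1)), ?_, ?_, ?_, ?_⟩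
            · have hmiss2' : List.filter (fun p => (mm2.get? p).isNone)
                  ([((x' : Nat), (y' : Nat)), (x', y' + 1), (x' + 1, y')]) = [] := by
                simpa [hdeps] using hmiss2
              have hv : max (max (mm2.getD (x', y') 0 +
                    (if a.getD x' ' ' = b.getD y' ' ' then m else s))
                    (mm2.getD (x', y' + 1) 0 + d)) (mm2.getD (x' + 1, y') 0 + d) =
                  pvT a b m s d (x' + 1) (y' + 1) := by
                simp only [PySem.Dict.getD_eq_get?_getD, hd1, hd2, hd3, Option.getD_some]
                rw [pvT]
                simp [pvMt]
              simp only [pvBLoop, hsome2, Option.isSome_none, Bool.false_eq_true, if_false, hbd',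
                if_false, Nat.add_sub_cancel]
              rw [if_pos hmiss2', hv]
            · intro u w' v' hg
              rw [PySem.Dict.get?_insert] at hg
              split_ifs at hg with he
              · cases hg; cases he; rfl
              · exact hval2 u w' v' hg
            · intro k v' hk
              rw [PySem.Dict.get?_insert]
              split_ifs with he
              · subst he; rw [hmono2 _ _ hk] at hsome2; cases hsome2
              · exact hmono2 _ _ hk
            · rw [PySem.Dict.get?_insert_self]
          · -- memoized meanwhile: just pop
            refine ⟨mm2, ?_, hval2, hmono2, ?_⟩
            · simp only [pvBLoop, hsome2, Option.isSome_some, if_true]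
            · rw [hsome2, hval2 _ _ _ hsome2]
        by_cases hm : missing = []
        · -- all dependencies already memoized: compute immediately
          have hall : ∀ p ∈ deps, mm.get? p = some (pvT a b m s d p.1 p.2) := by
            intro p hp
            rcases hg : mm.get? p with _ | v'
            · exfalso
              have : p ∈ missing := by
                rw [hmiss, List.mem_filter]
                exact ⟨hp, by simp [hg]⟩
              rw [hm] at this; simp at this
            · rw [hval p.1 p.2 v' (by rw [← hg])]
          obtain ⟨mm', h1, h2, h3, h4⟩ := hfinal mm f hval (fun _ _ h => h) hall
          exact ⟨f, mm', h1, by omega, h2, h3, h4⟩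
        · -- push the missing dependencies, resolve them by strong induction, then compute
          rw [hstep, if_neg hm]
          -- resolving a list of cells of smaller sum
          have run_list : ∀ (L : List (Nat × Nat)), (∀ p ∈ L, p.1 + p.2 < n) →
              ∀ (st2 : List (Nat × Nat)) (mm2 : PySem.Dict (Nat × Nat) Int) (g : Nat),
                pvValid a b m s d mm2 → L.length * 4 ^ n ≤ g →
                ∃ g' mm', pvBLoop a b m s d g (L ++ st2) mm2 = pvBLoop a b m s d g' st2 mm' ∧
                  g - L.length * 4 ^ n ≤ g' ∧ pvValid a b m s d mm' ∧ pvMono mm2 mm' ∧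
                  ∀ p ∈ L, mm'.get? p = some (pvT a b m s d p.1 p.2) := by
            intro L
            induction L with
            | nil => intro _ st2 mm2 g hv _; exact ⟨g, mm2, rfl, by omega, hv, fun _ _ h => h, by simp⟩
            | cons p L ihL =>
              intro hLlt st2 mm2 g hv2 hg
              obtain ⟨px, py⟩ := p
              have hplt : px + py < n := hLlt (px, py) (by simp)
              have hpow : 4 ^ (px + py + 1) ≤ 4 ^ n := Nat.pow_le_pow_right (by norm_num) (by omega)
              simp only [List.length_cons, Nat.succ_mul] at hg
              obtain ⟨g1, mm3, he1, hg1, hv3, hmono3, hmem3⟩ :=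
                IH (px + py) (by omega) px py (le_refl _) (L ++ st2) mm2 g hv2 (by omega)
              obtain ⟨g2, mm4, he2, hg2, hv4, hmono4, hmem4⟩ :=
                ihL (fun q hq => hLlt q (by simp [hq])) st2 mm3 g1 hv3 (by omega)
              refine ⟨g2, mm4, ?_, ?_, hv4, ?_, ?_⟩
              · rw [List.cons_append, he1, he2]
              · simp only [List.length_cons, Nat.succ_mul]
                omega
              · intro k v' hk; exact hmono4 _ _ (hmono3 _ _ hk)
              · intro q hq
                rcases List.mem_cons.mp hq with rfl | hq'
                · exact hmono4 _ _ hmem3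
                · exact hmem4 q hq'
          have hmlen : missing.length ≤ 3 := by
            calc missing.length ≤ deps.length := List.length_filter_le _ _
            _ = 3 := by simp [hdeps]
          have hLen3 : missing.reverse.length * 4 ^ n ≤ 3 * 4 ^ n :=
            Nat.mul_le_mul_right _ (by simpa using hmlen)
          have h42 : 16 ≤ 4 ^ n := by
            calc (16 : Nat) = 4 ^ 2 := by norm_num
            _ ≤ 4 ^ n := Nat.pow_le_pow_right (by norm_num) hn2
          obtain ⟨g1, mm3, he1, hg1, hv3, hmono3, hmem3⟩ :=
            run_list missing.reverse
              (fun p hp => hdeps_lt p (List.mem_filter.mp (List.mem_reverse.mp hp)).1)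
              ((x' + 1, y' + 1) :: st) mm f hval (by omega)
          have hdeps3 : ∀ p ∈ deps, mm3.get? p = some (pvT a b m s d p.1 p.2) := by
            intro p hp
            by_cases hpm : (mm.get? p).isNone
            · exact hmem3 p (by
                rw [List.mem_reverse, hmiss, List.mem_filter]
                exact ⟨hp, by simpa using hpm⟩)
            · rcases hg : mm.get? p with _ | v'
              · rw [hg] at hpm; simp at hpm
              · rw [hmono3 _ _ hg, hval p.1 p.2 v' (by rw [← hg])]
          obtain ⟨g2, rfl⟩ : ∃ g2, g1 = g2 + 1 := ⟨g1 - 1, by omega⟩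
          obtain ⟨mm', h1, h2, h3, h4⟩ := hfinal mm3 g2 hv3 hmono3 hdeps3
          refine ⟨g2, mm', by rw [he1, h1], by omega, h2, h3, h4⟩
      · -- boundary cell: memoize 0
        have hbd' : x = 0 ∨ y = 0 := of_decide_eq_true hbd
        have hT0 : pvT a b m s d x y = 0 := by
          rcases hbd' with rfl | rfl
          · cases y <;> rw [pvT]
          · rw [pvT]
        refine ⟨f, mm.insert (x, y) 0, ?_, by omega, ?_, ?_, ?_⟩
        · simp only [pvBLoop, hsome, Option.isSome_none, Bool.false_eq_true, if_false, hbd', if_true]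
        · intro u w v' hg
          rw [PySem.Dict.get?_insert] at hg
          split_ifs at hg with he
          · cases hg; cases he; rw [hT0]
          · exact hval u w v' hg
        · intro k v' hk
          rw [PySem.Dict.get?_insert]
          split_ifs with he
          · subst he; rw [hk] at hsome; cases hsome
          · exact hk
        · rw [PySem.Dict.get?_insert_self, hT0]
    · -- already memoized: pop
      refine ⟨f, mm, ?_, by omega, hval, fun _ _ h => h, ?_⟩
      · simp only [pvBLoop, hsome, Option.isSome_some, if_true]
      · rw [hsome, hval _ _ _ hsome]

-- score(i, j) returns the DP value and keeps the memo valid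
lemma pvBScore_spec (a b : List Char) (m s d : Int) (i j : Nat)
    (mm : PySem.Dict (Nat × Nat) Int) (hval : pvValid a b m s d mm) :
    (pvBScore a b m s d i j mm).1 = pvT a b m s d i j ∧
      pvValid a b m s d (pvBScore a b m s d i j mm).2 := by
  obtain ⟨fuel', mm', he, _, hv', _, hmem⟩ :=
    pvBLoop_cell a b m s d (i + j) i j (le_refl _) [] mm (4 ^ (i + j + 1)) hval (le_refl _)
  have hfin : pvBLoop a b m s d (4 ^ (i + j + 1)) [(i, j)] mm = mm' := by
    rw [he, pvBLoop_nil]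
  constructor
  · simp only [pvBScore, hfin]
    rw [PySem.Dict.getD_eq_get?_getD, hmem]
    rfl
  · simp only [pvBScore, hfin]
    exact hv'

lemma pvValid_empty (a b : List Char) (m s d : Int) :
    pvValid a b m s d PySem.Dict.empty := by
  intro x y v h
  rw [PySem.Dict.get?_empty] at h
  cases h

-- B's main fold produces the final column and its arrows
lemma pvB_fold_char (a b : List Char) (m s d : Int) :
    ∀ k : Nat, ∃ mm, pvValid a b m s d mm ∧
      (List.range k).foldl (pvBStep a b m s d) (PySem.Dict.empty, [], []) =
        (mm, (List.range k).map (fun i => pvT a b m s d i b.length),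
             (List.range k).map (fun i => pvArrow a b m s d i b.length)) := by
  intro k
  induction k with
  | zero => exact ⟨PySem.Dict.empty, pvValid_empty a b m s d, by simp⟩
  | succ k ih =>
    obtain ⟨mm, hval, heq⟩ := ih
    rw [List.range_succ, List.foldl_append, heq]
    simp only [List.foldl_cons, List.foldl_nil, List.map_append, List.map_cons, List.map_nil]
    obtain ⟨hv1, hval1⟩ := pvBScore_spec a b m s d k b.length mm hval
    by_cases hb : b.length = 0
    · -- empty seq2: arrow "S"
      rw [hb] at hv1 hval1
      refine ⟨(pvBScore a b m s d k 0 mm).2, hval1, ?_⟩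
      simp only [pvBStep, hb]
      simp [hv1, pvArrow]
    · obtain ⟨n', hbn⟩ : ∃ n', b.length = n' + 1 := ⟨b.length - 1, by omega⟩
      rcases k with _ | k'
      · -- row 0: arrow "E"
        refine ⟨(pvBScore a b m s d 0 b.length mm).2, hval1, ?_⟩
        simp only [pvBStep]
        simp [hv1, pvArrow, hb]
      · -- interior row: D / E / S priority
        simp only [hbn] at hv1 hval1
        obtain ⟨hv2, hval2⟩ := pvBScore_spec a b m s d k' n' _ hval1
        obtain ⟨hv3, hval3⟩ := pvBScore_spec a b m s d (k' + 1) n' _ hval2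
        simp only [pvBStep, hbn, Nat.succ_ne_zero, if_false, Nat.add_sub_cancel, hv1, hv2, hv3]
        have hmt : (if a.getD k' ' ' = b.getD n' ' ' then m else s) = pvMt a b m s (k' + 1) (n' + 1) := by
          simp [pvMt]
        rw [hmt, pvArrow_succ]
        by_cases h1 : pvT a b m s d (k' + 1) (n' + 1) =
            pvT a b m s d k' n' + pvMt a b m s (k' + 1) (n' + 1)
        · rw [if_pos h1, if_pos h1]
          exact ⟨_, hval2, rfl⟩
        · rw [if_neg h1, if_neg h1]
          by_cases h2 : pvT a b m s d (k' + 1) (n' + 1) = pvT a b m s d (k' + 1) n' + d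
          · rw [if_pos h2, if_pos h2]
            exact ⟨_, hval3, rfl⟩
          · rw [if_neg h2, if_neg h2]
            exact ⟨_, hval3, rfl⟩

-- ===== VERDICT (by name: the statement is the Claim_ definition above) =====
theorem get_mid_col_spec : Claim_equal_get_mid_col := by
  intro seq1 seq2 m s d _
  simp only [Spec_get_mid_col, get_mid_col, get_mid_col_alt]
  obtain ⟨mm, _, heq⟩ := pvB_fold_char seq1.toList seq2.toList m s d (seq1.toList.length + 1)
  rw [pvA_outer_char _ _ m s d _ (Nat.le_refl _), heq]
  simp [pvACols, pvABts]
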